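-- pv_equiv track=rewrite | github.com/slothgsr/Xword | XtremeXword/tutortest.py | wordfinder
-- ===== SOURCE A (Python) =====
-- def wordfinder(arg1, arg2): #arg1 = combo,  arg2 = Gridlist
--     grid = arg2.copy()
--     for letter in sorted(arg1):
--         if len(grid) <=1:
--             break
--         remove = []
--         for word in grid:
--             if letter in word:
--                 remove.append(word)
--         for i in remove:
--             grid.remove(i)
--
--     return len(grid)
-- ===== SOURCE B (Python) =====
-- def wordfinder(arg1, arg2):  # arg1 = combo, arg2 = Gridlist
--     # letter -> increasing list of word indices containing that letter
--     pairs = []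
--     for i, w in enumerate(arg2):
--         for ch in set(w):
--             pairs.append((ch, i))
--     index = {}
--     for ch, i in pairs:
--         index.setdefault(ch, []).append(i)
--     removed = [False] * len(arg2)
--     alive = len(arg2)
--     for ch in sorted(set(arg1)):
--         if alive <= 1:
--             break
--         for i in index.get(ch, []):
--             if not removed[i]:
--                 removed[i] = True
--                 alive -= 1
--     return alive
-- ===== Notes on version B (the rewrite author's own statement) =====
-- stated objective: faster
-- what changed: Instead of repeatedly rescanning and rebuilding the shrinking grid list for every (possibly duplicate) combo letter, B builds a letter-to-word-index map once, then walks the sorted distinct letters marking removed words in a flag array with a running survivor count and the same early break.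
import Mathlib
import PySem

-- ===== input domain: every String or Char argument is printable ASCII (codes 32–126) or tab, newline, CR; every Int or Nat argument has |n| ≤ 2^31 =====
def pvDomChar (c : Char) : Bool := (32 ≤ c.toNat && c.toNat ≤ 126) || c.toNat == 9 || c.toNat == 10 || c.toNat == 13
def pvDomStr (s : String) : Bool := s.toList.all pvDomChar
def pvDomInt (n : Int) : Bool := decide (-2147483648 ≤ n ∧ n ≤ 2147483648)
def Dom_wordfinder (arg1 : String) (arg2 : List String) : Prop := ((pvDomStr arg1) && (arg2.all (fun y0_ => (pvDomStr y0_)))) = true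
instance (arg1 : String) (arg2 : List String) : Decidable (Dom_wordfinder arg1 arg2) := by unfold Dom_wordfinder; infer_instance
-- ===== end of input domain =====

-- B replaces A's per-letter rescans and list removals by a one-pass letter→word-index map,
-- a removed-flag array and a running survivor count (objective: faster).

-- ===== PORT A =====
-- remove = [];  for word in grid: if letter in word: remove.append(word)
def wfRemoveList (letter : Char) (grid : List String) : List String :=
  grid.foldl (fun r w => if PySem.Chars.isIn [letter] w.toList then r ++ [w] else r) []

-- for i in remove: grid.remove(i)   (each i is present in grid, so list.remove never raises;
-- getD only covers the unreachable none branch)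
def wfRemoveLoop (grid remove : List String) : List String :=
  remove.foldl (fun g w => (PySem.List.remove? g w).getD g) grid

-- for letter in sorted(arg1): if len(grid) <= 1: break; …
def wfLoopA : List Char → List String → List String
  | [], grid => grid
  | l :: ls, grid =>
    if grid.length ≤ 1 then grid
    else wfLoopA ls (wfRemoveLoop grid (wfRemoveList l grid))

def wordfinder (arg1 : String) (arg2 : List String) : Int :=
  ((wfLoopA (PySem.List.sorted arg1.toList (fun c => c) false) arg2).length : Int)

-- ===== PORT B =====
-- pairs = [];  for i, w in enumerate(arg2): for ch in set(w): pairs.append((ch, i))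
def wfPairs (ws : List String) : List (Char × Int) :=
  (PySem.List.enumerate ws 0).foldl
    (fun ps p => (PySem.Set.ofList p.2.toList).foldl (fun ps c => ps ++ [(c, p.1)]) ps) []

-- index = {};  for ch, i in pairs: index.setdefault(ch, []).append(i)
def wfIndex (pairs : List (Char × Int)) : PySem.Dict Char (List Int) :=
  pairs.foldl (fun d p => d.modify p.1 [] (· ++ [p.2])) PySem.Dict.empty

-- for i in index.get(ch, []): if not removed[i]: removed[i] = True; alive -= 1
def wfMark (st : List Bool × Int) (idxs : List Int) : List Bool × Int :=
  idxs.foldl (fun st i =>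
    if PySem.List.pyGetD st.1 i false = false then (PySem.List.pySetD st.1 i true, st.2 - 1)
    else st) st

-- for ch in sorted(set(arg1)): if alive <= 1: break; …
def wfLoopB (d : PySem.Dict Char (List Int)) : List Char → List Bool × Int → Int
  | [], st => st.2
  | c :: cs, st =>
    if st.2 ≤ 1 then st.2
    else wfLoopB d cs (wfMark st (d.getD c []))

def wordfinder_alt (arg1 : String) (arg2 : List String) : Int :=
  wfLoopB (wfIndex (wfPairs arg2))
    (PySem.List.sorted (PySem.Set.ofList arg1.toList) (fun c => c) false)
    (List.replicate arg2.length false, (arg2.length : Int))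

-- ===== PRECONDITION & SPEC =====
def Spec_wordfinder (arg1 : String) (arg2 : List String) (out : Int) : Prop := out = wordfinder_alt arg1 arg2
instance (arg1 : String) (arg2 : List String) (out : Int) : Decidable (Spec_wordfinder arg1 arg2 out) := by unfold Spec_wordfinder; infer_instance

-- ===== CLAIM (what is proved, stated in full; the proofs are below) =====
def Claim_equal_wordfinder : Prop := ∀ (arg1 : String) (arg2 : List String), Dom_wordfinder arg1 arg2 → Spec_wordfinder arg1 arg2 (wordfinder arg1 arg2)

-- ===== LEMMAS AND PROOFS =====

-- 'letter in word' for a single character is character membership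
theorem wf_isIn_singleton (c : Char) (s : List Char) : PySem.Chars.isIn [c] s = s.contains c := by
  by_cases h : c ∈ s
  · have : [c] <:+: s := by
      obtain ⟨l, r, rfl⟩ := List.append_of_mem h
      exact ⟨l, r, by simp⟩
    simp [h, (PySem.Chars.isIn_iff_infix [c] s).2 this]
  · have : ¬ ([c] <:+: s) := fun hi => h (hi.subset (by simp))
    have h2 : PySem.Chars.isIn [c] s = false := by
      cases hx : PySem.Chars.isIn [c] s
      · rfl
      · exact absurd ((PySem.Chars.isIn_iff_infix [c] s).1 hx) this
    simp [h2, h]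

-- removing elements none of which equals the head leaves the head in place
theorem wf_rm_cons (R : List String) : ∀ (x : String) (g : List String),
    (∀ w ∈ R, w ≠ x) → wfRemoveLoop (x :: g) R = x :: wfRemoveLoop g R := by
  induction R with
  | nil => intro x g _; rfl
  | cons r R ih =>
    intro x g h
    have hrx : x ≠ r := fun e => (h r (by simp)) e.symm
    simp only [wfRemoveLoop, List.foldl_cons, PySem.List.remove?_cons_of_ne g hrx]
    cases hr : PySem.List.remove? g r with
    | none => simpa [hr] using ih x g (fun w hw => h w (by simp [hw]))
    | some g' => simpa [hr] using ih x g' (fun w hw => h w (by simp [hw]))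

-- A's remove-list pass removes exactly the matching words
theorem wf_rm_fold (g : List String) (p : String → Bool) :
    wfRemoveLoop g (g.filter p) = g.filter (fun w => !p w) := by
  induction g with
  | nil => rfl
  | cons x t ih =>
    by_cases hx : p x = true
    · simp only [List.filter_cons, hx, if_pos]
      simp only [wfRemoveLoop, List.foldl_cons, PySem.List.remove?_cons_self, Option.getD_some]
      simpa [hx] using ih
    · have hx' : p x = false := by simpa using hx
      simp only [List.filter_cons, hx', Bool.false_eq_true, if_false]
      rw [show wfRemoveLoop (x :: t) (t.filter p) = x :: wfRemoveLoop t (t.filter p) from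
        wf_rm_cons _ x t (fun w hw => by
          intro e; subst e
          exact hx (List.of_mem_filter hw))]
      simp [ih]

-- abstract form of A's loop: the grid state is a filter
def wfCore : List Char → List String → List String
  | [], g => g
  | c :: cs, g => if g.length ≤ 1 then g else wfCore cs (g.filter (fun w => !(w.toList.contains c)))

theorem wf_loopA_eq_core : ∀ (l : List Char) (g : List String), wfLoopA l g = wfCore l g := by
  intro l
  induction l with
  | nil => intro g; rfl
  | cons c cs ih =>
    intro g
    simp only [wfLoopA, wfCore]
    by_cases h : g.length ≤ 1
    · simp [h]
    · simp only [h, if_false]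
      rw [show wfRemoveList c g = g.filter (fun w => PySem.Chars.isIn [c] w.toList) by
            simpa using PySem.List.foldl_append_if (fun w => PySem.Chars.isIn [c] w.toList) id g []]
      rw [show g.filter (fun w => PySem.Chars.isIn [c] w.toList)
            = g.filter (fun w => w.toList.contains c) from
          List.filter_congr (fun w _ => wf_isIn_singleton c w.toList)]
      rw [wf_rm_fold g (fun w => w.toList.contains c)]
      exact ih _

theorem wf_core_short (l : List Char) (g : List String) (h : g.length ≤ 1) : wfCore l g = g := by
  cases l <;> simp [wfCore, h]

-- skipping a letter that hits no word
theorem wf_core_skip (c : Char) (cs : List Char) (g : List String)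
    (h : ∀ w ∈ g, w.toList.contains c = false) : wfCore (c :: cs) g = wfCore cs g := by
  by_cases hl : g.length ≤ 1
  · simp [wfCore, hl, wf_core_short cs g hl]
  · simp only [wfCore, hl, if_false]
    congr 1
    exact List.filter_eq_self.2 (fun w hw => by simpa using h w hw)

-- ===== B side =====

def wfHit (S : List Char) (w : String) : Bool := S.any (fun c => w.toList.contains c)

theorem wf_hit_append (S : List Char) (c : Char) (w : String) :
    wfHit (S ++ [c]) w = (wfHit S w || w.toList.contains c) := by
  simp [wfHit]

-- the indices of the words containing c, counting from s
def wfIdxs (c : Char) : List String → Int → List Int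
  | [], _ => []
  | w :: t, s => (if w.toList.contains c then [s] else []) ++ wfIdxs c t (s + 1)

theorem wf_filter_eq_singleton {l : List Char} (c : Char) (h : l.Nodup) :
    l.filter (fun x => x == c) = if c ∈ l then [c] else [] := by
  induction l with
  | nil => simp
  | cons x t ih =>
    simp only [List.nodup_cons] at h
    by_cases hx : x = c
    · subst hx
      simp [ih h.2, h.1]
    · simp [hx, ih h.2, Ne.symm hx]

theorem wf_pairs_acc (ws : List String) : ∀ (s : Int) (acc : List (Char × Int)),
    (PySem.List.enumerate ws s).foldl
      (fun ps p => (PySem.Set.ofList p.2.toList).foldl (fun ps c => ps ++ [(c, p.1)]) ps) acc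
    = acc ++ (PySem.List.enumerate ws s).flatMap
        (fun p => (PySem.Set.ofList p.2.toList).map (fun c => (c, p.1))) := by
  induction ws with
  | nil => intro s acc; simp [PySem.List.enumerate]
  | cons w t ih =>
    intro s acc
    rw [PySem.List.enumerate_cons]
    simp only [List.foldl_cons, List.flatMap_cons]
    rw [PySem.List.foldl_append_singleton_eq_map (fun c => (c, s)) (PySem.Set.ofList w.toList) acc]
    rw [ih (s + 1)]
    simp [List.append_assoc]

theorem wf_flat_filter (c : Char) (ws : List String) : ∀ (s : Int),
    (((PySem.List.enumerate ws s).flatMap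
        (fun p => (PySem.Set.ofList p.2.toList).map (fun ch => (ch, p.1)))).filter
      (fun p => p.1 == c)).map (fun x => x.2) = wfIdxs c ws s := by
  induction ws with
  | nil => intro s; simp [PySem.List.enumerate, wfIdxs]
  | cons w t ih =>
    intro s
    rw [PySem.List.enumerate_cons]
    simp only [List.flatMap_cons, List.filter_append, List.map_append, wfIdxs]
    congr 1
    · rw [List.filter_map, List.map_map]
      have he : ((PySem.Set.ofList w.toList).filter
            ((fun p : Char × Int => p.1 == c) ∘ (fun ch => (ch, s)))).map
            ((fun x : Char × Int => x.2) ∘ (fun ch => (ch, s)))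
          = ((PySem.Set.ofList w.toList).filter (fun ch => ch == c)).map (fun _ => s) := rfl
      rw [he, wf_filter_eq_singleton c (PySem.Set.nodup_ofList w.toList)]
      by_cases h : c ∈ w.toList
      · simp [PySem.Set.mem_ofList, h]
      · simp [PySem.Set.mem_ofList, h]
    · exact ih (s + 1)

theorem wf_index_getD (ws : List String) (c : Char) :
    (wfIndex (wfPairs ws)).getD c [] = wfIdxs c ws 0 := by
  unfold wfIndex wfPairs
  rw [PySem.Dict.getD_foldl_modify_append]
  rw [wf_pairs_acc ws 0 []]
  simp only [List.nil_append]
  rw [wf_flat_filter c ws 0]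
  rfl

-- reading / writing the flag at position pre.length
theorem wf_get_at (pre : List Bool) (b : Bool) (rest : List Bool) :
    PySem.List.pyGetD (pre ++ b :: rest) ((pre.length : Int)) false = b := by
  rw [PySem.List.pyGetD_natCast, List.getD_append_right _ _ _ _ (le_refl _)]
  simp

theorem wf_set_at (pre : List Bool) (b : Bool) (rest : List Bool) (v : Bool) :
    PySem.List.pySetD (pre ++ b :: rest) ((pre.length : Int)) v = pre ++ v :: rest := by
  rw [PySem.List.pySetD_natCast, List.set_append_right _ _ (le_refl _)]
  simp

-- marking pass: flags become "hit by S ++ [c]", count drops by the newly hit words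
theorem wf_mark_spec (c : Char) (S : List Char) : ∀ (t : List String) (pre : List Bool) (a : Int),
    wfMark (pre ++ t.map (fun w => wfHit S w), a) (wfIdxs c t (pre.length : Int))
      = (pre ++ t.map (fun w => wfHit (S ++ [c]) w),
         a - ((t.filter (fun w => !wfHit S w && w.toList.contains c)).length : Int)) := by
  intro t
  induction t with
  | nil => intro pre a; simp [wfIdxs, wfMark]
  | cons w t ih =>
    intro pre a
    by_cases hc : w.toList.contains c = true
    · simp only [wfIdxs, hc, if_pos, List.singleton_append, List.map_cons]
      simp only [wfMark, List.foldl_cons, wf_get_at]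
      by_cases hS : wfHit S w = false
      · have hw' : wfHit (S ++ [c]) w = true := by rw [wf_hit_append, hS, hc]; rfl
        simp only [hS, if_pos, wf_set_at]
        have hih := ih (pre ++ [true]) (a - 1)
        simp only [List.append_assoc, List.singleton_append, List.length_append,
          List.length_cons, List.length_nil, Nat.cast_add, Nat.cast_one, zero_add,
          wfMark] at hih
        rw [hih, hw']
        simp only [Prod.mk.injEq, List.filter_cons, hS, hc, Bool.not_false, Bool.and_self,
          if_pos, List.length_cons, true_and]
        push_cast
        ring
      · have hS' : wfHit S w = true := by simpa using hS
        have hw' : wfHit (S ++ [c]) w = true := by rw [wf_hit_append, hS']; rfl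
        simp only [hS', Bool.true_eq_false, if_false]
        have hih := ih (pre ++ [true]) a
        simp only [List.append_assoc, List.singleton_append, List.length_append,
          List.length_cons, List.length_nil, Nat.cast_add, Nat.cast_one, zero_add,
          wfMark] at hih
        rw [hih, hw']
        have hni : ¬ (wfHit S w = false ∧ c ∈ w.toList) := by simp [hS']
        simp [hni]
    · have hc' : w.toList.contains c = false := by simpa using hc
      have hw' : wfHit (S ++ [c]) w = wfHit S w := by rw [wf_hit_append, hc']; simp
      simp only [wfIdxs, hc', Bool.false_eq_true, if_false, List.nil_append, List.map_cons]
      have hih := ih (pre ++ [wfHit S w]) a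
      simp only [List.append_assoc, List.singleton_append, List.length_append,
        List.length_cons, List.length_nil, Nat.cast_add, Nat.cast_one, zero_add] at hih
      rw [hih, hw']
      have hmem : c ∉ w.toList := by simpa using hc'
      simp [hmem]

-- counting a filter split by a second predicate
theorem wf_filter_split (P Q : String → Bool) (ws : List String) :
    (ws.filter P).length
      = (ws.filter (fun w => P w && Q w)).length
        + (ws.filter (fun w => P w && !Q w)).length := by
  induction ws with
  | nil => simp
  | cons w t ih =>
    simp only [List.filter_cons]
    cases hp : P w <;> cases hq : Q w <;> simp [*] <;> omega

-- survivor counting: splitting the live words by whether they contain c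
theorem wf_count_split (S : List Char) (c : Char) (ws : List String) :
    ((ws.filter (fun w => !wfHit S w)).length : Int)
      - ((ws.filter (fun w => !wfHit S w && w.toList.contains c)).length : Int)
    = ((ws.filter (fun w => !wfHit (S ++ [c]) w)).length : Int) := by
  have hcong : ws.filter (fun w => !wfHit (S ++ [c]) w)
      = ws.filter (fun w => !wfHit S w && !(w.toList.contains c)) := by
    refine List.filter_congr ?_
    intro w _
    rw [wf_hit_append]
    cases wfHit S w <;> cases h : w.toList.contains c <;> simp [*]
  rw [hcong]
  have h := wf_filter_split (fun w => !wfHit S w) (fun w => w.toList.contains c) ws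
  omega

theorem wf_loopB_eq_core (ws : List String) : ∀ (cs : List Char) (S : List Char),
    wfLoopB (wfIndex (wfPairs ws)) cs
      (ws.map (fun w => wfHit S w), ((ws.filter (fun w => !wfHit S w)).length : Int))
    = ((wfCore cs (ws.filter (fun w => !wfHit S w))).length : Int) := by
  intro cs
  induction cs with
  | nil => intro S; rfl
  | cons c cs ih =>
    intro S
    simp only [wfLoopB, wfCore]
    by_cases h : (ws.filter (fun w => !wfHit S w)).length ≤ 1
    · have h' : (((ws.filter (fun w => !wfHit S w)).length : Int)) ≤ 1 := by exact_mod_cast h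
      simp [h, h']
    · have h' : ¬ (((ws.filter (fun w => !wfHit S w)).length : Int)) ≤ 1 := by
        simpa using h
      simp only [h, h', if_false]
      rw [wf_index_getD ws c]
      have hm := wf_mark_spec c S ws ([]) ((ws.filter (fun w => !wfHit S w)).length : Int)
      simp only [List.nil_append, List.length_nil, Nat.cast_zero] at hm
      rw [hm, wf_count_split S c ws]
      rw [ih (S ++ [c])]
      have hAB : (ws.filter (fun w => !wfHit S w)).filter (fun w => !(w.toList.contains c))
          = ws.filter (fun w => !wfHit (S ++ [c]) w) := by
        rw [List.filter_filter]
        refine List.filter_congr ?_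
        intro w _
        rw [wf_hit_append]
        cases wfHit S w <;> cases hw : w.toList.contains c <;> simp [*]
      rw [← hAB]

-- ===== collapsing duplicate letters =====

def wfDstt : List Char → List Char
  | [] => []
  | [c] => [c]
  | c :: d :: t => if c = d then wfDstt (d :: t) else c :: wfDstt (d :: t)

theorem wf_mem_dstt (x : Char) : ∀ (l : List Char), x ∈ wfDstt l ↔ x ∈ l := by
  intro l
  induction l using wfDstt.induct with
  | case1 => simp [wfDstt]
  | case2 c => simp [wfDstt]
  | case3 d t ih => simp only [wfDstt]; simp [ih]
  | case4 c d t h ih => simp [wfDstt, h, ih]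

theorem wf_dstt_pairwise : ∀ (l : List Char), l.Pairwise (· ≤ ·) → (wfDstt l).Pairwise (· < ·) := by
  intro l
  induction l using wfDstt.induct with
  | case1 => simp [wfDstt]
  | case2 c => simp [wfDstt]
  | case3 d t ih => intro hp; simp only [wfDstt]; exact ih hp.tail
  | case4 c d t h ih =>
    intro hp
    simp only [wfDstt, h, if_false]
    refine List.Pairwise.cons ?_ (ih hp.tail)
    intro y hy
    have hy' : y ∈ d :: t := (wf_mem_dstt y (d :: t)).1 hy
    have hle : c ≤ y := (List.pairwise_cons.1 hp).1 y hy'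
    rcases List.mem_cons.1 hy' with rfl | hyt
    · exact lt_of_le_of_ne hle h
    · have hdy : d ≤ y := (List.pairwise_cons.1 hp.tail).1 y hyt
      exact lt_of_lt_of_le (lt_of_le_of_ne ((List.pairwise_cons.1 hp).1 d (by simp)) h) hdy

theorem wf_core_dup (c : Char) (cs : List Char) (g : List String) :
    wfCore (c :: c :: cs) g = wfCore (c :: cs) g := by
  by_cases hl : g.length ≤ 1
  · simp [wfCore, hl]
  · conv_lhs => rw [wfCore]
    conv_rhs => rw [wfCore]
    simp only [hl, if_false]
    exact wf_core_skip c cs _ (fun w hw => by simpa using List.of_mem_filter hw)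

theorem wf_core_dstt : ∀ (l : List Char), l.Pairwise (· ≤ ·) → ∀ (g : List String),
    wfCore l g = wfCore (wfDstt l) g := by
  intro l
  induction l using wfDstt.induct with
  | case1 => intro _ g; rfl
  | case2 c => intro _ g; rfl
  | case3 d t ih =>
    intro hp g
    rw [wf_core_dup d t g]
    simp only [wfDstt]
    exact ih hp.tail g
  | case4 c d t h ih =>
    intro hp g
    simp only [wfDstt, h, if_false]
    by_cases hl : g.length ≤ 1
    · simp [wfCore, hl]
    · simp only [wfCore, hl, if_false]
      exact ih hp.tail _

theorem wf_dstt_sorted (l : List Char) :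
    PySem.List.sorted (PySem.Set.ofList l) (fun c => c) false
      = wfDstt (PySem.List.sorted l (fun c => c) false) := by
  apply PySem.List.sorted_eq_of_perm_of_pairwise_lt
  · rw [List.perm_ext_iff_of_nodup
      (List.Pairwise.nodup (wf_dstt_pairwise _ (PySem.List.sorted_pairwise l (fun c => c))))
      (PySem.Set.nodup_ofList l)]
    intro a
    rw [wf_mem_dstt, PySem.List.mem_sorted, PySem.Set.mem_ofList]
  · exact wf_dstt_pairwise _ (PySem.List.sorted_pairwise l (fun c => c))

-- ===== VERDICT (by name: the statement is the Claim_ definition above) =====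
theorem wordfinder_spec : Claim_equal_wordfinder := by
  intro arg1 arg2 _
  unfold Spec_wordfinder wordfinder wordfinder_alt
  rw [wf_loopA_eq_core]
  rw [wf_core_dstt _ (PySem.List.sorted_pairwise arg1.toList (fun c => c)) arg2]
  rw [← wf_dstt_sorted arg1.toList]
  have h0 : (List.replicate arg2.length false) = arg2.map (fun w => wfHit [] w) := by
    simp [wfHit, List.map_const']
  have h1 : arg2 = arg2.filter (fun w => !wfHit [] w) := by
    simp [wfHit]
  rw [h0]
  rw [show ((arg2.length : Int)) = ((arg2.filter (fun w => !wfHit [] w)).length : Int) by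
    rw [← h1]]
  rw [wf_loopB_eq_core arg2 _ []]
  rw [← h1]
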